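-- pv_equiv track=rewrite | github.com/ma-zihan/TSPJ | src/hi.py | calculate_completion_time_TSPJ
-- ===== SOURCE A (Python) =====
-- def calculate_completion_time_TSPJ(sequence, job_sequence, T, TT):
--     '''
--     sequence: [0,1,2,3,4,5,0], from the depot to the depot, len(sequence)=n+1
--     job_sequence: [0,5,3,4,1,2], only from the depot, len(job_sequence)=n
--     T: T[0][i]==0 and T[i][0]==0, len(T)=n
--     TT: TT[i][i]==0 and TT[i][j]==TT[j][i], len(TT)=n
--     return C: from the depot to the depot, len(C)=n+1
--     '''
--     C = [0] * len(sequence)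
--     current_time = 0
--
--     for i in range(1, len(sequence) - 1):
--         current_node = sequence[i]
--         previous_node = sequence[i - 1]
--         travel_time = TT[previous_node][current_node]
--         current_time += travel_time
--
--         job_time = T[current_node][job_sequence[current_node]]
--         C[current_node] = current_time + job_time
--
--     travel_time_back_to_start = TT[sequence[-2]][sequence[-1]]
--     current_time += travel_time_back_to_start
--     C[-1] = current_time
--
--     return C
-- ===== SOURCE B (Python) =====
-- def calculate_completion_time_TSPJ(sequence, job_sequence, T, TT):
--     # Two-pass decomposition: prefix table of travel times, then one assignment pass.
--     cum = [0]
--     for a, b in zip(sequence, sequence[1:]):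
--         cum.append(cum[-1] + TT[a][b])
--     C = [0] * len(sequence)
--     for i, node in enumerate(sequence[1:-1]):
--         C[node] = cum[i + 1] + T[node][job_sequence[node]]
--     C[-1] = cum[-1]
--     return C
-- ===== Notes on version B (the rewrite author's own statement) =====
-- stated objective: alternative
-- what changed: Replaces A's single pass with a running scalar clock by two separate passes: first a cumulative travel-time prefix table over consecutive route pairs, then an assignment pass over the enumerated interior slice that reads completion times positionally from the table.
import Mathlib
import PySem

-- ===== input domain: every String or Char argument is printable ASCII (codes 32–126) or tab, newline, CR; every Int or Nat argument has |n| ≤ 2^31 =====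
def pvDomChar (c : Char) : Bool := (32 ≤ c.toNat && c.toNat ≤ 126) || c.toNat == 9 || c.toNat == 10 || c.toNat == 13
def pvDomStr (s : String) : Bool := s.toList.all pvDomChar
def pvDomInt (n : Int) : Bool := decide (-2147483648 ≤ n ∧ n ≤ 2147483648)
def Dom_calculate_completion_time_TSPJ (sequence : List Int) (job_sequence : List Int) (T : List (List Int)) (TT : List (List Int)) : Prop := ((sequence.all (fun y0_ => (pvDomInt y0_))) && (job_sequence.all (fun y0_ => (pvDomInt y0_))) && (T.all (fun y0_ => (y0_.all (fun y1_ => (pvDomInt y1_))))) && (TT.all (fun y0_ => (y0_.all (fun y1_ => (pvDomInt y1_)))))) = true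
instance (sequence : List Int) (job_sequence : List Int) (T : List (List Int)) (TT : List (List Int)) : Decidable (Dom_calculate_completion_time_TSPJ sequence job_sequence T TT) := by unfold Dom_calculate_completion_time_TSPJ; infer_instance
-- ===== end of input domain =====

-- B replaces A's single running-clock pass by a cumulative travel-time prefix table plus a
-- separate assignment pass over the enumerated interior slice (objective: alternative).

-- ===== PORT A =====
def calculate_completion_time_TSPJ (sequence : List Int) (job_sequence : List Int) (T : List (List Int)) (TT : List (List Int)) : List Int :=
  -- C = [0] * len(sequence); current_time = 0
  let C0 : List Int := List.replicate sequence.length 0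
  -- for i in range(1, len(sequence) - 1): ...
  let st := (PySem.List.pyRange 1 ((sequence.length : Int) - 1) 1).foldl
    (fun (st : List Int × Int) i =>
      let current_node := PySem.List.pyGetD sequence i 0
      let previous_node := PySem.List.pyGetD sequence (i - 1) 0
      let travel_time := PySem.List.pyGetD (PySem.List.pyGetD TT previous_node []) current_node 0
      let current_time := st.2 + travel_time
      let job_time := PySem.List.pyGetD (PySem.List.pyGetD T current_node []) (PySem.List.pyGetD job_sequence current_node 0) 0
      (PySem.List.pySetD st.1 current_node (current_time + job_time), current_time))
    (C0, 0)
  -- travel_time_back_to_start = TT[sequence[-2]][sequence[-1]]; C[-1] = current_time + ...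
  let travel_time_back_to_start := PySem.List.pyGetD (PySem.List.pyGetD TT (PySem.List.pyGetD sequence (-2) 0) []) (PySem.List.pyGetD sequence (-1) 0) 0
  PySem.List.pySetD st.1 (-1) (st.2 + travel_time_back_to_start)

-- ===== PORT B =====
def calculate_completion_time_TSPJ_alt (sequence : List Int) (job_sequence : List Int) (T : List (List Int)) (TT : List (List Int)) : List Int :=
  -- cum = [0]; for a, b in zip(sequence, sequence[1:]): cum.append(cum[-1] + TT[a][b])
  let cum := (sequence.zip (PySem.List.slice sequence (some 1) none)).foldl
    (fun (cum : List Int) p =>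
      cum ++ [PySem.List.pyGetD cum (-1) 0 + PySem.List.pyGetD (PySem.List.pyGetD TT p.1 []) p.2 0])
    [(0 : Int)]
  -- C = [0] * len(sequence); for i, node in enumerate(sequence[1:-1]): C[node] = cum[i+1] + T[node][job_sequence[node]]
  let C0 : List Int := List.replicate sequence.length 0
  let C := (PySem.List.enumerate (PySem.List.slice sequence (some 1) (some (-1)))).foldl
    (fun (C : List Int) p =>
      PySem.List.pySetD C p.2 (PySem.List.pyGetD cum (p.1 + 1) 0 + PySem.List.pyGetD (PySem.List.pyGetD T p.2 []) (PySem.List.pyGetD job_sequence p.2 0) 0))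
    C0
  -- C[-1] = cum[-1]
  PySem.List.pySetD C (-1) (PySem.List.pyGetD cum (-1) 0)

-- ===== PRECONDITION & SPEC =====
-- every matrix entry A touches must exist (possibly via Python's negative-index wraparound)
def pvEntryOK (M : List (List Int)) (a b : Int) : Bool :=
  match PySem.List.pyGet? M a with
  | some row => decide (PySem.Raise.InRange row.length b)
  | none => false

def pvJobOK (job_sequence : List Int) (T : List (List Int)) (clen : Nat) (v : Int) : Bool :=
  decide (PySem.Raise.InRange clen v) &&
  (match PySem.List.pyGet? job_sequence v, PySem.List.pyGet? T v with
   | some j, some row => decide (PySem.Raise.InRange row.length j)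
   | _, _ => false)

-- Pre_ = exactly the inputs where Python A returns: route of length ≥ 2, every consecutive
-- travel lookup TT[a][b] in range, and for every interior node v: v a valid C index,
-- job_sequence[v] and T[v][job_sequence[v]] in range.
def Pre_calculate_completion_time_TSPJ (sequence : List Int) (job_sequence : List Int) (T : List (List Int)) (TT : List (List Int)) : Prop :=
  2 ≤ sequence.length ∧
  (∀ p ∈ sequence.zip sequence.tail, pvEntryOK TT p.1 p.2 = true) ∧
  (∀ v ∈ sequence.tail.dropLast, pvJobOK job_sequence T sequence.length v = true)

instance (sequence : List Int) (job_sequence : List Int) (T : List (List Int)) (TT : List (List Int)) : Decidable (Pre_calculate_completion_time_TSPJ sequence job_sequence T TT) := by unfold Pre_calculate_completion_time_TSPJ; infer_instance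

def pvWitness_calculate_completion_time_TSPJ : List Int × List Int × List (List Int) × List (List Int) :=
  ([0, 1, 0], [0, 0], [[0, 0], [7, 7]], [[0, 3], [3, 0]])

def Spec_calculate_completion_time_TSPJ (sequence : List Int) (job_sequence : List Int) (T : List (List Int)) (TT : List (List Int)) (out : List Int) : Prop := out = calculate_completion_time_TSPJ_alt sequence job_sequence T TT
instance (sequence : List Int) (job_sequence : List Int) (T : List (List Int)) (TT : List (List Int)) (out : List Int) : Decidable (Spec_calculate_completion_time_TSPJ sequence job_sequence T TT out) := by unfold Spec_calculate_completion_time_TSPJ; infer_instance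

-- ===== CLAIM (what is proved, stated in full; the proofs are below) =====
def Claim_equal_calculate_completion_time_TSPJ : Prop := ∀ (sequence : List Int) (job_sequence : List Int) (T : List (List Int)) (TT : List (List Int)), Dom_calculate_completion_time_TSPJ sequence job_sequence T TT → Pre_calculate_completion_time_TSPJ sequence job_sequence T TT → Spec_calculate_completion_time_TSPJ sequence job_sequence T TT (calculate_completion_time_TSPJ sequence job_sequence T TT)

-- ===== LEMMAS AND PROOFS =====

-- value of the route at Int index i (total form used by both ports)
def seqAt (sequence : List Int) (i : Int) : Int := PySem.List.pyGetD sequence i 0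

-- travel time of the j-th consecutive pair
def ttAt (sequence : List Int) (TT : List (List Int)) (j : Nat) : Int :=
  PySem.List.pyGetD (PySem.List.pyGetD TT (seqAt sequence j) []) (seqAt sequence ((j : Int) + 1)) 0

-- cumulative travel time after the first j legs
def cumAt (sequence : List Int) (TT : List (List Int)) (j : Nat) : Int :=
  ((List.range j).map (ttAt sequence TT)).sum

-- job time at node v
def jobAt (job_sequence : List Int) (T : List (List Int)) (v : Int) : Int :=
  PySem.List.pyGetD (PySem.List.pyGetD T v []) (PySem.List.pyGetD job_sequence v 0) 0

-- the common assignment pass: for each position j in js, C[seq[j]] = cum[j] + job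
def buildC (sequence : List Int) (job_sequence : List Int) (T : List (List Int)) (TT : List (List Int)) (js : List Nat) (C : List Int) : List Int :=
  js.foldl (fun (C : List Int) (j : Nat) => PySem.List.pySetD C (seqAt sequence (j : Int)) (cumAt sequence TT j + jobAt job_sequence T (seqAt sequence (j : Int)))) C

theorem cumAt_succ (sequence : List Int) (TT : List (List Int)) (j : Nat) :
    cumAt sequence TT (j + 1) = cumAt sequence TT j + ttAt sequence TT j := by
  simp [cumAt, List.range_succ]

-- pyGetD at -1 is getLastD (total form)
theorem pyGetD_neg_one_getLastD (xs : List Int) (d : Int) :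
    PySem.List.pyGetD xs (-1) d = xs.getLastD d := by
  cases xs with
  | nil => simp [PySem.List.pyGetD, PySem.List.pyGet?, PySem.List.pyIdx?]
  | cons a l =>
    rw [PySem.List.pyGetD_neg_one (a :: l) d (by simp)]
    rw [List.getLastD_eq_getLast?, List.getLast?_eq_some_getLast (by simp)]
    rfl

-- generic prefix-scan shape of B's first loop
theorem scan_gen (g : Int × Int → Int) (ps : List (Int × Int)) :
    ∀ (acc : List Int),
    ps.foldl (fun c p => c ++ [PySem.List.pyGetD c (-1) 0 + g p]) acc
      = acc ++ (List.range ps.length).map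
          (fun i => acc.getLastD 0 + ((ps.take (i + 1)).map g).sum) := by
  induction ps with
  | nil => intro acc; simp
  | cons p ps ih =>
    intro acc
    rw [List.foldl_cons, ih, pyGetD_neg_one_getLastD]
    rw [List.append_assoc]
    congr 1
    rw [List.length_cons, List.range_succ_eq_map]
    simp only [List.map_cons, List.map_map, List.singleton_append]
    congr 1
    · simp
    · apply List.map_congr_left
      intro i _
      simp [Function.comp, List.take_succ_cons, add_assoc]

-- the j-th leg of B's prefix scan is ttAt j
theorem take_zip_map (sequence : List Int) (TT : List (List Int)) (j : Nat) (hj : j + 1 ≤ sequence.length) :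
    ((sequence.zip sequence.tail).take j).map
        (fun p => PySem.List.pyGetD (PySem.List.pyGetD TT p.1 []) p.2 0)
      = (List.range j).map (ttAt sequence TT) := by
  apply List.ext_getElem
  · simp [List.length_zip, List.length_tail]; omega
  · intro k h1 h2
    have hk : k < j := by simp [List.length_zip, List.length_tail] at h1; omega
    have hkn : k + 1 < sequence.length := by omega
    simp only [List.getElem_map, List.getElem_take, List.getElem_range, List.getElem_zip,
      List.getElem_tail]
    simp only [ttAt, seqAt]
    rw [show ((k : Nat) : Int) + 1 = ((k + 1 : Nat) : Int) from by push_cast; ring]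
    rw [PySem.List.pyGetD_natCast, PySem.List.pyGetD_natCast]
    rw [List.getD_eq_getElem sequence 0 (by omega), List.getD_eq_getElem sequence 0 hkn]

-- B's first loop builds the table of cumulative travel times
theorem cum_eq (sequence : List Int) (TT : List (List Int)) (h2 : 2 ≤ sequence.length) :
    (sequence.zip (PySem.List.slice sequence (some 1) none)).foldl
        (fun (cum : List Int) p =>
          cum ++ [PySem.List.pyGetD cum (-1) 0 + PySem.List.pyGetD (PySem.List.pyGetD TT p.1 []) p.2 0])
        [(0 : Int)]
      = (List.range sequence.length).map (cumAt sequence TT) := by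
  rw [PySem.List.slice_from_one]
  rw [scan_gen]
  have hm : (sequence.zip sequence.tail).length = sequence.length - 1 := by
    simp [List.length_zip, List.length_tail]
  rw [hm]
  conv_rhs => rw [show sequence.length = (sequence.length - 1) + 1 from by omega,
    List.range_succ_eq_map]
  simp only [List.map_cons, List.map_map]
  rw [List.singleton_append]
  refine List.cons_eq_cons.mpr ⟨by simp [cumAt], ?_⟩
  apply List.map_congr_left
  intro i hi
  have hi' : i < sequence.length - 1 := List.mem_range.mp hi
  rw [take_zip_map sequence TT (i + 1) (by omega)]
  simp [cumAt, Nat.succ_eq_add_one]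

-- the interior slice, enumerated
theorem enum_interior (sequence : List Int) (h2 : 2 ≤ sequence.length) :
    PySem.List.enumerate (PySem.List.slice sequence (some 1) (some (-1)))
      = (List.range (sequence.length - 2)).map
          (fun (i : Nat) => ((i : Int), seqAt sequence ((1 + i : Nat) : Int))) := by
  have hs : PySem.List.slice sequence (some 1) (some (-1))
      = (sequence.drop 1).take (sequence.length - 2) := by
    simp [PySem.List.slice]
    rw [Nat.min_eq_left (by omega)]
    congr 1
    exact List.drop_one
  rw [hs]
  apply List.ext_getElem
  · simp only [PySem.List.length_enumerate, List.length_map, List.length_range,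
      List.length_take, List.length_drop]
    omega
  · intro k h1 h2'
    have hk : k < sequence.length - 2 := by
      simp only [PySem.List.length_enumerate, List.length_take, List.length_drop] at h1
      omega
    rw [PySem.List.getElem_enumerate]
    simp only [List.getElem_map, List.getElem_range, List.getElem_take, List.getElem_drop]
    simp only [Prod.mk.injEq]
    refine ⟨by simp, ?_⟩
    simp only [seqAt]
    rw [PySem.List.pyGetD_natCast, List.getD_eq_getElem sequence 0 (by omega)]

-- A's loop with its running clock, characterised against buildC
theorem A_loop (sequence job_sequence : List Int) (T TT : List (List Int)) :
    ∀ (k s : Nat) (C : List Int) (t : Int), 1 ≤ s → t = cumAt sequence TT (s - 1) →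
    (PySem.List.pyRange (s : Int) ((s : Int) + (k : Int)) 1).foldl
      (fun (st : List Int × Int) i =>
        let current_node := PySem.List.pyGetD sequence i 0
        let previous_node := PySem.List.pyGetD sequence (i - 1) 0
        let travel_time := PySem.List.pyGetD (PySem.List.pyGetD TT previous_node []) current_node 0
        let current_time := st.2 + travel_time
        let job_time := PySem.List.pyGetD (PySem.List.pyGetD T current_node []) (PySem.List.pyGetD job_sequence current_node 0) 0
        (PySem.List.pySetD st.1 current_node (current_time + job_time), current_time))
      (C, t)
    = (buildC sequence job_sequence T TT (List.range' s k) C, cumAt sequence TT (s - 1 + k)) := by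
  intro k
  induction k with
  | zero =>
    intro s C t hs ht
    rw [show ((s : Int) + ((0 : Nat) : Int)) = (s : Int) from by push_cast; ring]
    rw [PySem.List.pyRange_one_eq_nil (by omega)]
    simp [buildC, ht]
  | succ k ih =>
    intro s C t hs ht
    subst ht
    rw [PySem.List.pyRange_one_cons (by push_cast; omega)]
    rw [List.foldl_cons]
    dsimp only
    rw [show ((s : Int) - 1) = ((s - 1 : Nat) : Int) from by omega]
    have e4 : PySem.List.pyGetD (PySem.List.pyGetD TT (PySem.List.pyGetD sequence ((s - 1 : Nat) : Int) 0) []) (PySem.List.pyGetD sequence (s : Int) 0) 0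
        = ttAt sequence TT (s - 1) := by
      simp only [ttAt, seqAt]
      rw [show ((s - 1 : Nat) : Int) + 1 = (s : Int) from by omega]
    rw [e4, ← cumAt_succ]
    rw [show s - 1 + 1 = s from by omega]
    rw [show ((s : Int) + ((k + 1 : Nat) : Int)) = (((s + 1 : Nat) : Int) + (k : Int)) from by push_cast; ring]
    rw [show ((s : Int) + 1) = ((s + 1 : Nat) : Int) from by push_cast; ring]
    rw [ih (s + 1) _ _ (by omega) (by rw [Nat.add_sub_cancel])]
    rw [List.range'_succ]
    simp only [buildC, List.foldl_cons, seqAt, jobAt]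
    congr 2
    omega

theorem calculate_completion_time_TSPJ_spec : Claim_equal_calculate_completion_time_TSPJ := by
  intro sequence job_sequence T TT hdom hpre
  obtain ⟨h2, -, -⟩ := hpre
  unfold Spec_calculate_completion_time_TSPJ calculate_completion_time_TSPJ calculate_completion_time_TSPJ_alt
  dsimp only
  have hrange : PySem.List.pyRange 1 ((sequence.length : Int) - 1) 1
      = PySem.List.pyRange (((1 : Nat)) : Int) ((((1 : Nat)) : Int) + ((sequence.length - 2 : Nat) : Int)) 1 := by
    congr 1
    push_cast
    omega
  rw [hrange]
  rw [A_loop sequence job_sequence T TT (sequence.length - 2) 1 (List.replicate sequence.length 0) 0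
      (le_refl 1) (by simp [cumAt])]
  dsimp only
  rw [show 1 - 1 + (sequence.length - 2) = sequence.length - 2 from by omega]
  have hback : PySem.List.pyGetD (PySem.List.pyGetD TT (PySem.List.pyGetD sequence (-2) 0) []) (PySem.List.pyGetD sequence (-1) 0) 0
      = ttAt sequence TT (sequence.length - 2) := by
    have hx : PySem.List.pyGetD sequence (-2) 0 = seqAt sequence ((sequence.length - 2 : Nat) : Int) := by
      rw [PySem.List.pyGetD_neg_ofNat sequence 2 0 (by omega) (by omega)]
      simp only [seqAt]
      rw [PySem.List.pyGetD_natCast, List.getD_eq_getElem sequence 0 (by omega)]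
    have hy : PySem.List.pyGetD sequence (-1) 0 = seqAt sequence (((sequence.length - 2 : Nat) : Int) + 1) := by
      rw [pyGetD_neg_one_getLastD]
      simp only [seqAt]
      rw [show ((sequence.length - 2 : Nat) : Int) + 1 = ((sequence.length - 1 : Nat) : Int) from by omega]
      rw [PySem.List.pyGetD_natCast, List.getD_eq_getElem sequence 0 (by omega)]
      rw [List.getLastD_eq_getLast?, List.getLast?_eq_getElem?]
      rw [List.getElem?_eq_getElem (by omega)]
      rfl
    rw [hx, hy]
    simp only [ttAt]
  rw [hback]
  rw [show cumAt sequence TT (sequence.length - 2) + ttAt sequence TT (sequence.length - 2)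
      = cumAt sequence TT (sequence.length - 1) from by rw [← cumAt_succ]; congr 1; omega]
  rw [cum_eq sequence TT h2]
  rw [enum_interior sequence h2]
  rw [List.foldl_map]
  dsimp only
  have hlastB : PySem.List.pyGetD ((List.range sequence.length).map (cumAt sequence TT)) (-1) 0
      = cumAt sequence TT (sequence.length - 1) := by
    rw [pyGetD_neg_one_getLastD]
    conv_lhs => rw [show sequence.length = (sequence.length - 1) + 1 from by omega,
      List.range_succ, List.map_append]
    simp only [List.map_cons, List.map_nil, List.getLastD_concat]
  rw [hlastB]
  have hfold : List.foldl
      (fun (C : List Int) (i : Nat) => PySem.List.pySetD C (seqAt sequence ((1 + i : Nat) : Int))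
        (PySem.List.pyGetD ((List.range sequence.length).map (cumAt sequence TT)) ((i : Int) + 1) 0 +
          PySem.List.pyGetD (PySem.List.pyGetD T (seqAt sequence ((1 + i : Nat) : Int)) [])
            (PySem.List.pyGetD job_sequence (seqAt sequence ((1 + i : Nat) : Int)) 0) 0))
      (List.replicate sequence.length 0) (List.range (sequence.length - 2))
      = buildC sequence job_sequence T TT (List.range' 1 (sequence.length - 2)) (List.replicate sequence.length 0) := by
    rw [buildC, List.range'_eq_map_range, List.foldl_map]
    apply PySem.List.foldl_congr_mem
    intro acc i hi
    have hi' : i < sequence.length - 2 := List.mem_range.mp hi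
    rw [show ((i : Nat) : Int) + 1 = ((i + 1 : Nat) : Int) from by push_cast; ring]
    rw [PySem.List.pyGetD_natCast, List.getD_eq_getElem _ 0 (by simp; omega), List.getElem_map,
      List.getElem_range]
    simp only [jobAt, seqAt]
    rw [show i + 1 = 1 + i from by omega]
  rw [hfold]
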